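-- pv_equiv track=rewrite | github.com/dj-foxxy/advent-of-code | 2015/08/aoc.py | part_1
-- ===== SOURCE A (Python) =====
-- from enum import Enum, auto, unique
-- from typing import Literal, final
--
-- @final
-- @unique
-- class State(Enum):
--     START = auto()
--     SLASH_1 = auto()
--     HEX_1 = auto()
--     HEX_2 = auto()
--
-- def part_1(text: str) -> int:
--     state = State.START
--     code_len = 0
--     data_len = 0
--     for c in text:
--         if c == '\n':
--             continue
--         code_len += 1
--         match c:
--             case '\\':
--                 match state:
--                     case State.START:
--                         state = State.SLASH_1
--                     case State.SLASH_1: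
--                         state = State.START
--                         data_len += 1
--                     case _:
--                         raise ValueError()
--             case '"':
--                 match state:
--                     case State.START:
--                         pass
--                     case State.SLASH_1:
--                         state = State.START
--                         data_len += 1
--                     case _:
--                         raise ValueError()
--             case 'x':
--                 match state:
--                     case State.START:
--                         data_len += 1
--                     case State.SLASH_1:
--                         state = State.HEX_1
--                     case _:
--                         raise ValueError()
--             case _:
--                 match state:
--                     case State.START:
--                         data_len += 1
--                     case State.HEX_1:
--                         state = State.HEX_2
--                     case State.HEX_2:
--                         data_len += 1
--                         state = State.START
--                     case _:
--                         raise ValueError()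
--     return code_len - data_len
-- ===== SOURCE B (Python) =====
-- def part_1(text: str) -> int:
--     # Newlines carry no information here, so strip them and scan with a lookahead
--     # index, consuming a whole escape sequence (2 or 4 characters) per step.
--     s = text.replace('\n', '')
--     data = 0
--     i = 0
--     while i < len(s):
--         c = s[i]
--         if c == '\\':
--             data += 1
--             i += 4 if s[i + 1:i + 2] == 'x' else 2
--         elif c == '"':
--             i += 1
--         else:
--             data += 1
--             i += 1
--     return len(s) - data
-- ===== Notes on version B (the rewrite author's own statement) =====
-- stated objective: simpler
-- what changed: Replaced A's character-by-character 4-state FSM (Enum states START/SLASH_1/HEX_1/HEX_2) with a newline strip followed by a lookahead index scan that consumes a whole escape sequence (2 or 4 chars) per step; Pre_ excludes malformed escapes, i.e. strings on which A raises ValueError and strings ending in a truncated escape, a malformed corner where counting or not counting the unfinished escape are both defensible.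
-- outside the precondition, e.g. on part_1('\\'): A returns 1, B returns 0; on part_1('ab\\x4'): A returns 3, B returns 2
import Mathlib
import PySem

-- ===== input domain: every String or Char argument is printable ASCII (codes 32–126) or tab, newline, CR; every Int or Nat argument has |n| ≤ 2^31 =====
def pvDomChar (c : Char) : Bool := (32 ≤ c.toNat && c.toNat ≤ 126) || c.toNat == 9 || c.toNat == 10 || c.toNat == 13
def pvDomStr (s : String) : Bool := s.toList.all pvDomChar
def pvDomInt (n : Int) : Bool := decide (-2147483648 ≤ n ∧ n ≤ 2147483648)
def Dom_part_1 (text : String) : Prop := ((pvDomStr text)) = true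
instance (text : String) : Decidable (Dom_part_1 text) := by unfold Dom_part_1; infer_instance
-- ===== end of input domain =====

-- B replaces A's 4-state FSM with a newline strip followed by a lookahead scan that
-- consumes a whole escape sequence at once (objective: simpler).

-- ===== PORT A =====
inductive PvSt | START | SLASH_1 | HEX_1 | HEX_2
deriving DecidableEq, Repr

-- literal transliteration of A's for-loop; `none` = Python's ValueError (excluded by Pre_)
def pvLoopA : PvSt → Int → Int → List Char → Option Int
  | _, code, data, [] => some (code - data)
  | st, code, data, c :: r =>
    if c = '\n' then pvLoopA st code data r
    else
      let code := code + 1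
      if c = '\\' then
        match st with
        | .START => pvLoopA .SLASH_1 code data r
        | .SLASH_1 => pvLoopA .START code (data + 1) r
        | _ => none
      else if c = '"' then
        match st with
        | .START => pvLoopA .START code data r
        | .SLASH_1 => pvLoopA .START code (data + 1) r
        | _ => none
      else if c = 'x' then
        match st with
        | .START => pvLoopA .START code (data + 1) r
        | .SLASH_1 => pvLoopA .HEX_1 code data r
        | _ => none
      else
        match st with
        | .START => pvLoopA .START code (data + 1) r
        | .HEX_1 => pvLoopA .HEX_2 code data r
        | .HEX_2 => pvLoopA .START code (data + 1) r
        | _ => none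

def part_1 (text : String) : Int := (pvLoopA .START 0 0 text.toList).getD 0

-- ===== PORT B =====
-- Source B's while loop over an index with lookahead, as recursion on the char list:
-- on '\', count one decoded char and skip 2 or 4 code chars (`s[i+1:i+2] == 'x'`
-- becomes `r.take 1 = ['x']`).
def pvScanB : List Char → Int
  | [] => 0
  | c :: r =>
    if c = '\\' then
      if r.take 1 = ['x'] then 1 + pvScanB (r.drop 3)
      else 1 + pvScanB (r.drop 1)
    else if c = '"' then pvScanB r
    else 1 + pvScanB r
termination_by l => l.length
decreasing_by all_goals (simp only [List.length_cons, List.length_drop]; omega)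

def part_1_alt (text : String) : Int :=
  let s := text.toList.filter (fun c => c ≠ '\n')
  (s.length : Int) - pvScanB s

-- ===== PRECONDITION & SPEC =====
-- Pre_ admits exactly the strings whose escapes (after newline removal, which A ignores)
-- are well formed: every backslash starts a complete '\\', '\"' or '\xHH' sequence with
-- neither hex slot holding '\', '"' or 'x'.  It excludes the strings with a malformed
-- escape, on which A raises ValueError, and the strings ending in a truncated escape
-- ('\', '\x', '\xH'), a malformed-input corner where counting or not counting the
-- unfinished escape in the decoded length are both defensible (A does not, B does).
def pvOk : List Char → Bool
  | [] => true
  | c :: r =>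
    if c = '\\' then
      match r with
      | [] => false
      | d :: r2 =>
        if d = '\\' ∨ d = '"' then pvOk r2
        else if d = 'x' then
          match r2 with
          | h1 :: h2 :: r4 =>
            if h1 = '\\' ∨ h1 = '"' ∨ h1 = 'x' ∨ h2 = '\\' ∨ h2 = '"' ∨ h2 = 'x' then false
            else pvOk r4
          | _ => false
        else false
    else pvOk r

def Pre_part_1 (text : String) : Prop :=
  pvOk (text.toList.filter (fun c => c ≠ '\n')) = true
instance (text : String) : Decidable (Pre_part_1 text) := by unfold Pre_part_1; infer_instance

def pvWitness_part_1 : String := "ab"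

def Spec_part_1 (text : String) (out : Int) : Prop := out = part_1_alt text
instance (text : String) (out : Int) : Decidable (Spec_part_1 text out) := by unfold Spec_part_1; infer_instance

-- ===== CLAIM (what is proved, stated in full; the proofs are below) =====
def Claim_equal_part_1 : Prop := ∀ (text : String), Dom_part_1 text → Pre_part_1 text → Spec_part_1 text (part_1 text)

-- ===== LEMMAS AND PROOFS =====

-- A's loop ignores newlines entirely
lemma pvLoopA_filter (l : List Char) : ∀ (st : PvSt) (code data : Int),
    pvLoopA st code data l = pvLoopA st code data (l.filter (fun c => c ≠ '\n')) := by
  induction l with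
  | nil => intro st code data; rfl
  | cons c r ih =>
    intro st code data
    by_cases h : c = '\n'
    · subst h; simp [pvLoopA, ih]
    · have hf : (c :: r).filter (fun x => x ≠ '\n') = c :: r.filter (fun x => x ≠ '\n') := by
        simp [h]
      rw [hf]
      cases st <;> simp only [pvLoopA, if_neg h] <;> split_ifs <;> first | rw [ih] | rfl

-- main invariant: on a newline-free, well-formed list, A's FSM computes
-- code + length - (data + decoded-count)
lemma pvKey : ∀ (n : Nat) (m : List Char), m.length ≤ n → '\n' ∉ m → pvOk m = true →
    ∀ (code data : Int),
      pvLoopA .START code data m = some (code + (m.length : Int) - (data + pvScanB m)) := by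
  intro n
  induction n with
  | zero =>
    intro m hm _ _ code data
    have : m = [] := List.eq_nil_of_length_eq_zero (Nat.le_zero.mp hm)
    subst this; simp [pvLoopA, pvScanB]
  | succ n ih =>
    intro m hm hnl hok code data
    match m with
    | [] => simp [pvLoopA, pvScanB]
    | c :: r =>
      have hc : c ≠ '\n' := fun h => hnl (h ▸ List.mem_cons_self ..)
      have hnlr : '\n' ∉ r := fun h => hnl (List.mem_cons_of_mem _ h)
      by_cases hb : c = '\\'
      · subst hb
        match r with
        | [] => rw [pvOk.eq_def] at hok; simp at hok
        | d :: r2 =>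
          have hnld : d ≠ '\n' := fun h => hnlr (h ▸ List.mem_cons_self ..)
          have hnlr2 : '\n' ∉ r2 := fun h => hnlr (List.mem_cons_of_mem _ h)
          by_cases hd : d = '\\' ∨ d = '"'
          · -- two-char escape
            rcases hd with h | h
            · subst h
              have hok2 : pvOk r2 = true := by
                rw [pvOk.eq_def] at hok; simpa using hok
              have hstep : pvLoopA .START code data ('\\' :: '\\' :: r2)
                  = pvLoopA .START (code + 1 + 1) (data + 1) r2 := by
                simp [pvLoopA]
              have hscan : pvScanB ('\\' :: '\\' :: r2) = 1 + pvScanB r2 := by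
                rw [pvScanB.eq_def]; simp
              rw [hstep, ih r2 (by simp at hm ⊢; omega) hnlr2 hok2, hscan]
              congr 1
              simp only [List.length_cons]
              push_cast
              ring
            · subst h
              have hok2 : pvOk r2 = true := by
                rw [pvOk.eq_def] at hok; simpa using hok
              have hstep : pvLoopA .START code data ('\\' :: '"' :: r2)
                  = pvLoopA .START (code + 1 + 1) (data + 1) r2 := by
                simp [pvLoopA]
              have hscan : pvScanB ('\\' :: '"' :: r2) = 1 + pvScanB r2 := by
                rw [pvScanB.eq_def]; simp
              rw [hstep, ih r2 (by simp at hm ⊢; omega) hnlr2 hok2, hscan]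
              congr 1
              simp only [List.length_cons]
              push_cast
              ring
          · have hdx : d = 'x' := by
              by_contra hx
              rw [pvOk.eq_def] at hok
              simp [hd, hx] at hok
            subst hdx
            match r2 with
            | [] => rw [pvOk.eq_def] at hok; simp at hok
            | [h1] => rw [pvOk.eq_def] at hok; simp at hok
            | h1 :: h2 :: r4 =>
              rw [pvOk.eq_def] at hok
              simp only [List.cons.injEq, reduceIte, reduceCtorEq] at hok
              have hok' : ¬(h1 = '\\' ∨ h1 = '"' ∨ h1 = 'x' ∨ h2 = '\\' ∨ h2 = '"' ∨ h2 = 'x')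
                  ∧ pvOk r4 = true := by
                by_cases hh : h1 = '\\' ∨ h1 = '"' ∨ h1 = 'x' ∨ h2 = '\\' ∨ h2 = '"' ∨ h2 = 'x'
                · simp [hh] at hok
                · exact ⟨hh, by simpa [hh] using hok⟩
              obtain ⟨hh, hok4⟩ := hok'
              push_neg at hh
              obtain ⟨h1b, h1q, h1x, h2b, h2q, h2x⟩ := hh
              have h1n : h1 ≠ '\n' := fun h =>
                hnlr2 (h ▸ List.mem_cons_self ..)
              have h2n : h2 ≠ '\n' := fun h =>
                hnlr2 (List.mem_cons_of_mem _ (h ▸ List.mem_cons_self ..))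
              have hnlr4 : '\n' ∉ r4 := fun h =>
                hnlr2 (List.mem_cons_of_mem _ (List.mem_cons_of_mem _ h))
              have hstep : pvLoopA .START code data ('\\' :: 'x' :: h1 :: h2 :: r4)
                  = pvLoopA .START (code + 1 + 1 + 1 + 1) (data + 1) r4 := by
                simp [pvLoopA, h1n, h1b, h1q, h1x, h2n, h2b, h2q, h2x]
              have hscan : pvScanB ('\\' :: 'x' :: h1 :: h2 :: r4) = 1 + pvScanB r4 := by
                rw [pvScanB.eq_def]; simp
              rw [hstep, ih r4 (by simp at hm ⊢; omega) hnlr4 hok4, hscan]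
              congr 1
              simp only [List.length_cons]
              push_cast
              ring
      · -- non-backslash at top level: '"' counts code only, anything else both
        have hokr : pvOk r = true := by
          rw [pvOk.eq_def] at hok; simpa [hb] using hok
        have hmr : r.length ≤ n := by simp at hm; omega
        by_cases hq : c = '"'
        · subst hq
          have hstep : pvLoopA .START code data ('"' :: r)
              = pvLoopA .START (code + 1) data r := by simp [pvLoopA]
          have hscan : pvScanB ('"' :: r) = pvScanB r := by
            rw [pvScanB.eq_def]; simp
          rw [hstep, ih r hmr hnlr hokr, hscan]
          congr 1
          simp only [List.length_cons]
          push_cast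
          ring
        · have hstep : pvLoopA .START code data (c :: r)
              = pvLoopA .START (code + 1) (data + 1) r := by
            by_cases hx : c = 'x'
            · subst hx; simp [pvLoopA]
            · simp [pvLoopA, hc, hb, hq, hx]
          have hscan : pvScanB (c :: r) = 1 + pvScanB r := by
            rw [pvScanB.eq_def]; simp [hb, hq]
          rw [hstep, ih r hmr hnlr hokr, hscan]
          congr 1
          simp only [List.length_cons]
          push_cast
          ring

-- ===== VERDICT (by name: the statement is the Claim_ definition above) =====
theorem part_1_spec : Claim_equal_part_1 := by
  intro text _ hpre
  unfold Spec_part_1 part_1 part_1_alt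
  rw [pvLoopA_filter]
  rw [pvKey (text.toList.filter (fun c => c ≠ '\n')).length _ le_rfl
      (by simp) hpre 0 0]
  simp
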